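-- pv_equiv track=rewrite | github.com/jgonagle/kaggle-epilepsy-challenge | src/conv_nnet.py | calc_cnn_image_dims
-- ===== SOURCE A (Python) =====
-- def calc_cnn_image_dims(start_image_dims, conv_filter_dims, conv_max_pool_dims):
--
--     num_conv_layers = min(len(conv_filter_dims), len(conv_max_pool_dims))
--
--     conv_image_dims = [None for i in range(num_conv_layers + 1)]
--     conv_image_dims[0] = start_image_dims
--
--     for i in range(1, num_conv_layers + 1):
--         filter_height = conv_filter_dims[i - 1][0]
--         filter_width = conv_filter_dims[i - 1][1]
--         max_pool_height = conv_max_pool_dims[i - 1][0]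
--         max_pool_width = conv_max_pool_dims[i - 1][1]
--         prev_image_height = conv_image_dims[i - 1][0]
--         prev_image_width = conv_image_dims[i - 1][1]
--
--         conv_image_dims[i] = ((prev_image_height - filter_height + 1) // max_pool_height, (prev_image_width - filter_width + 1) // max_pool_width)
--
--     return conv_image_dims
-- ===== SOURCE B (Python) =====
-- def calc_cnn_image_dims(start_image_dims, conv_filter_dims, conv_max_pool_dims):
--     def go(cur, pairs):
--         if not pairs:
--             return [cur]
--         (fh, fw), (ph, pw) = pairs[0]
--         nxt = ((cur[0] - fh + 1) // ph, (cur[1] - fw + 1) // pw)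
--         return [cur] + go(nxt, pairs[1:])
--     return go(start_image_dims, list(zip(conv_filter_dims, conv_max_pool_dims)))
-- ===== Notes on version B (the rewrite author's own statement) =====
-- stated objective: alternative
-- what changed: Replaces the pre-allocated None list filled by an index loop (reading conv_image_dims[i-1]) with structural recursion over zip(conv_filter_dims, conv_max_pool_dims) that threads the previous dimension as an accumulator and builds the result list directly.
import Mathlib
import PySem

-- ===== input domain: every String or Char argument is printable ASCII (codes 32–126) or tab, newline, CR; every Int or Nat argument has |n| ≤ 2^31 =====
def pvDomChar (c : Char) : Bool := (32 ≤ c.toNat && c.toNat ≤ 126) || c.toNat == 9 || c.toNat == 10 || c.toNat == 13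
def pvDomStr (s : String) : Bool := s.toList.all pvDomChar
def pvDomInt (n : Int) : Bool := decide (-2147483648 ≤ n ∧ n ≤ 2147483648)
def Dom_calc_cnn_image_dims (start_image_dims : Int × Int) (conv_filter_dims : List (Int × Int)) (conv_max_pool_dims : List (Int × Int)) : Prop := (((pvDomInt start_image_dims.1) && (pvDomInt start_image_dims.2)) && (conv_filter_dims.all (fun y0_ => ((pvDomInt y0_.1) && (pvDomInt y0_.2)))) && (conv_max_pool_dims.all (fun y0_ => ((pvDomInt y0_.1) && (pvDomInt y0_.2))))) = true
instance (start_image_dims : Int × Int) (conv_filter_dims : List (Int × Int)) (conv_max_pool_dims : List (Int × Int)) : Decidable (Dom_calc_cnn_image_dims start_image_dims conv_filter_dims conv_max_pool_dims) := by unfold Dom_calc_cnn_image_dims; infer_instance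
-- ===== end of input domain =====

-- B replaces A's pre-allocated None list filled by an index loop with structural
-- recursion over the zipped (filter, pool) pairs, threading the previous dimension
-- as an accumulator (objective: alternative decomposition, same cost).

-- ===== PORT A =====
-- loop body of A's for-loop, extracted as a helper (reads at i-1, writes at i)
def pvStepA (conv_filter_dims conv_max_pool_dims : List (Int × Int))
    (dims : List (Option (Int × Int))) (i : Int) : List (Option (Int × Int)) :=
  let fd := (PySem.List.pyGet? conv_filter_dims (i - 1)).getD (0, 0)
  let pd := (PySem.List.pyGet? conv_max_pool_dims (i - 1)).getD (0, 0)
  let prev := ((PySem.List.pyGet? dims (i - 1)).getD none).getD (0, 0)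
  dims.set i.toNat (some (PySem.Int.floordiv (prev.1 - fd.1 + 1) pd.1,
                          PySem.Int.floordiv (prev.2 - fd.2 + 1) pd.2))

def calc_cnn_image_dims (start_image_dims : Int × Int) (conv_filter_dims : List (Int × Int)) (conv_max_pool_dims : List (Int × Int)) : List (Int × Int) :=
  let num_conv_layers := min conv_filter_dims.length conv_max_pool_dims.length
  let conv_image_dims : List (Option (Int × Int)) :=
    (List.replicate (num_conv_layers + 1) none).set 0 (some start_image_dims)
  let final := (PySem.List.pyRange 1 ((num_conv_layers : Int) + 1) 1).foldl
    (pvStepA conv_filter_dims conv_max_pool_dims) conv_image_dims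
  -- all entries are filled; .getD (0,0) only discharges the Option (Python has no None left)
  final.map (fun o => o.getD (0, 0))

-- ===== PORT B =====
def pvNext (cur : Int × Int) (z : (Int × Int) × (Int × Int)) : Int × Int :=
  (PySem.Int.floordiv (cur.1 - z.1.1 + 1) z.2.1, PySem.Int.floordiv (cur.2 - z.1.2 + 1) z.2.2)

def pvGo (cur : Int × Int) : List ((Int × Int) × (Int × Int)) → List (Int × Int)
  | [] => [cur]
  | z :: rest => cur :: pvGo (pvNext cur z) rest

def calc_cnn_image_dims_alt (start_image_dims : Int × Int) (conv_filter_dims : List (Int × Int)) (conv_max_pool_dims : List (Int × Int)) : List (Int × Int) :=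
  pvGo start_image_dims (conv_filter_dims.zip conv_max_pool_dims)

-- ===== PRECONDITION & SPEC =====
-- Pre_ excludes exactly the inputs where Python A raises ZeroDivisionError:
-- a zero max-pool component within the used (zipped) prefix.
def Pre_calc_cnn_image_dims (start_image_dims : Int × Int) (conv_filter_dims : List (Int × Int)) (conv_max_pool_dims : List (Int × Int)) : Prop :=
  ∀ z ∈ conv_filter_dims.zip conv_max_pool_dims, z.2.1 ≠ 0 ∧ z.2.2 ≠ 0
instance (start_image_dims : Int × Int) (conv_filter_dims : List (Int × Int)) (conv_max_pool_dims : List (Int × Int)) : Decidable (Pre_calc_cnn_image_dims start_image_dims conv_filter_dims conv_max_pool_dims) := by unfold Pre_calc_cnn_image_dims; infer_instance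

def pvWitness_calc_cnn_image_dims : (Int × Int) × (List (Int × Int)) × (List (Int × Int)) :=
  ((8, 8), [(3, 3)], [(2, 2)])

def Spec_calc_cnn_image_dims (start_image_dims : Int × Int) (conv_filter_dims : List (Int × Int)) (conv_max_pool_dims : List (Int × Int)) (out : List (Int × Int)) : Prop := out = calc_cnn_image_dims_alt start_image_dims conv_filter_dims conv_max_pool_dims
instance (start_image_dims : Int × Int) (conv_filter_dims : List (Int × Int)) (conv_max_pool_dims : List (Int × Int)) (out : List (Int × Int)) : Decidable (Spec_calc_cnn_image_dims start_image_dims conv_filter_dims conv_max_pool_dims out) := by unfold Spec_calc_cnn_image_dims; infer_instance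

-- ===== CLAIM (what is proved, stated in full; the proofs are below) =====
def Claim_equal_calc_cnn_image_dims : Prop := ∀ (start_image_dims : Int × Int) (conv_filter_dims : List (Int × Int)) (conv_max_pool_dims : List (Int × Int)), Dom_calc_cnn_image_dims start_image_dims conv_filter_dims conv_max_pool_dims → Pre_calc_cnn_image_dims start_image_dims conv_filter_dims conv_max_pool_dims → Spec_calc_cnn_image_dims start_image_dims conv_filter_dims conv_max_pool_dims (calc_cnn_image_dims start_image_dims conv_filter_dims conv_max_pool_dims)

-- ===== LEMMAS AND PROOFS =====

theorem pvGo_length (c : Int × Int) (zs : List ((Int × Int) × (Int × Int))) :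
    (pvGo c zs).length = zs.length + 1 := by
  induction zs generalizing c with
  | nil => rfl
  | cons z rest ih => simp [pvGo, ih]

theorem pvGo_get_zero (c : Int × Int) (zs : List ((Int × Int) × (Int × Int)))
    (h : 0 < (pvGo c zs).length) : (pvGo c zs)[0] = c := by
  cases zs <;> rfl

theorem pvGo_get_succ (c : Int × Int) (zs : List ((Int × Int) × (Int × Int))) (k : Nat)
    (hk : k < zs.length) :
    (pvGo c zs)[k + 1]'(by simp [pvGo_length]; omega) =
      pvNext ((pvGo c zs)[k]'(by simp [pvGo_length]; omega))
             (zs[k]'hk) := by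
  induction zs generalizing c k with
  | nil => simp at hk
  | cons z rest ih =>
    cases k with
    | zero => simp [pvGo, pvGo_get_zero]
    | succ k =>
      have hk' : k < rest.length := by simpa using hk
      simpa [pvGo] using ih (pvNext c z) k hk'

-- loop invariant: after processing indices 1..k the first k+1 slots hold
-- the first k+1 elements of pvGo, the rest are still none
theorem pvInv (f p : List (Int × Int)) (s : Int × Int) (k : Nat)
    (hk : k ≤ (f.zip p).length) :
    (PySem.List.pyRange 1 ((k : Int) + 1) 1).foldl (pvStepA f p)
      ((List.replicate ((f.zip p).length + 1) none).set 0 (some s))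
    = ((pvGo s (f.zip p)).take (k + 1)).map some
        ++ List.replicate ((f.zip p).length - k) none := by
  set zs := f.zip p with hzs
  set n := zs.length with hn
  set g := pvGo s zs with hg
  induction k with
  | zero =>
    rw [PySem.List.pyRange_one_eq_nil (by norm_num)]
    have h1 : (List.replicate (n + 1) (none : Option (Int × Int))).set 0 (some s)
        = some s :: List.replicate n none := by
      simp [List.replicate_succ]
    have h2 : g.take 1 = [s] := by
      cases hz : zs with
      | nil => simp [hg, hz, pvGo]
      | cons a l => simp [hg, hz, pvGo]
    simp [List.foldl, h1, h2]
  | succ k ih =>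
    have hk' : k ≤ n := by omega
    have hkn : k < n := by omega
    have hglen : g.length = n + 1 := pvGo_length s zs
    have hrange : PySem.List.pyRange 1 ((k + 1 : Nat) + 1) 1
        = PySem.List.pyRange 1 ((k : Int) + 1) 1 ++ [(k : Int) + 1] := by
      have := PySem.List.pyRange_one_succ_right (a := 1) (b := (k : Int) + 1) (by omega)
      rw [← this]; push_cast; ring_nf
    rw [hrange, List.foldl_append, ih hk']
    -- now compute one step of pvStepA at index (k:Int)+1
    have hmin : n = min f.length p.length := by rw [hn, hzs, List.length_zip]
    have hfk : k < f.length := by omega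
    have hpk : k < p.length := by omega
    have hidx : ((k : Int) + 1 - 1) = (k : Int) := by ring
    have hf : (PySem.List.pyGet? f ((k : Int) + 1 - 1)).getD (0, 0) = f[k] := by
      rw [hidx]; simp [PySem.List.pyGet?_natCast, List.getElem?_eq_getElem hfk]
    have hp : (PySem.List.pyGet? p ((k : Int) + 1 - 1)).getD (0, 0) = p[k] := by
      rw [hidx]; simp [PySem.List.pyGet?_natCast, List.getElem?_eq_getElem hpk]
    have hprefixlen : ((g.take (k + 1)).map some).length = k + 1 := by
      simp [List.length_take]; omega
    have hgk : k < g.length := by omega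
    have hprev :
        ((PySem.List.pyGet? ((g.take (k + 1)).map some ++ List.replicate (n - k) none)
            ((k : Int) + 1 - 1)).getD none).getD (0, 0) = g[k] := by
      rw [hidx]
      rw [PySem.List.pyGet?_natCast]
      rw [List.getElem?_append_left (by omega)]
      simp [List.getElem?_eq_getElem hgk]
    have hset : (((k : Int) + 1)).toNat = k + 1 := by omega
    have hrep : List.replicate (n - k) (none : Option (Int × Int))
        = none :: List.replicate (n - (k + 1)) none := by
      rw [show n - k = (n - (k + 1)) + 1 from by omega, List.replicate_succ]
    have hzk : zs[k]'hkn = (f[k], p[k]) := by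
      simp [hzs]
    have hgsucc : g[k + 1]'(by omega) = pvNext (g[k]'hgk) (f[k], p[k]) := by
      rw [hg] at *
      rw [pvGo_get_succ s zs k hkn, ← hzk]
    have htake : g.take (k + 1 + 1) = g.take (k + 1) ++ [g[k + 1]'(by omega)] := by
      rw [List.take_add_one, List.getElem?_eq_getElem (by omega)]
      rfl
    show pvStepA f p _ ((k : Int) + 1) = _
    rw [pvStepA]
    simp only [hf, hp, hprev, hset]
    rw [hrep]
    rw [List.set_append_right _ _ (by omega)]
    simp only [hprefixlen]
    have : k + 1 - (k + 1) = 0 := by omega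
    rw [this]
    rw [htake]
    simp [hgsucc, pvNext]
-- ===== VERDICT (by name: the statement is the Claim_ definition above) =====
theorem calc_cnn_image_dims_spec : Claim_equal_calc_cnn_image_dims := by
  intro s f p _ _
  unfold Spec_calc_cnn_image_dims calc_cnn_image_dims calc_cnn_image_dims_alt
  have hn : min f.length p.length = (f.zip p).length := (List.length_zip).symm
  have hlen : (pvGo s (f.zip p)).length = (f.zip p).length + 1 := pvGo_length _ _
  simp only [hn]
  rw [pvInv f p s (f.zip p).length (le_refl _)]
  simp [List.map_map]
  omega
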